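-- pv_equiv track=rewrite | github.com/tarohida/at-coder | 20190915/que2.py | detect_q2
-- ===== SOURCE A (Python) =====
-- def detect_q2(step_list):
--     for k,s in enumerate(step_list):
--
--         if k % 2 == 0:
--             if s == 'L':
--                 return False
--         else:
--             if s == 'R':
--                 return False
--
--     return True
-- ===== SOURCE B (Python) =====
-- def detect_q2(step_list):
--     # Consume the list two steps at a time: in each chunk the first element
--     # must not be 'L' and the second (if present) must not be 'R'.
--     it = list(step_list)
--     while it:
--         if it[0] == 'L':
--             return False
--         if len(it) > 1 and it[1] == 'R':
--             return False
--         it = it[2:]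
--     return True
-- ===== Notes on version B (the rewrite author's own statement) =====
-- stated objective: alternative
-- what changed: Replaces the enumerate-with-parity-branch scan by an index-free loop that consumes the list in chunks of two, checking the chunk head against 'L' and the chunk second against 'R'.
import Mathlib
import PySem

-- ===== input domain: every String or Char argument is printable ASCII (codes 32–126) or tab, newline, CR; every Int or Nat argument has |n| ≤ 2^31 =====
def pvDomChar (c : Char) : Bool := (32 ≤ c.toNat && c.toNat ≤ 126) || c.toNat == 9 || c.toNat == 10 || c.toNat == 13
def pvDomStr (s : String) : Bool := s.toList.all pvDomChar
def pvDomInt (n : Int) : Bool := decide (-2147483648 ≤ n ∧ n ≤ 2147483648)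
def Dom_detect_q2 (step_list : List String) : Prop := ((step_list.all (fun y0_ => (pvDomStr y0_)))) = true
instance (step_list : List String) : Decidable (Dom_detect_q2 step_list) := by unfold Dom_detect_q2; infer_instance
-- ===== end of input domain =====

-- B replaces A's enumerate/parity loop by an index-free loop consuming the list two elements at a time (alternative decomposition, same cost).


-- ===== PORT A =====
-- 'for k, s in enumerate(step_list): …' with early returns, as a recursion carrying the index k
def detect_q2_go (k : Nat) : List String → Bool
  | [] => true
  | s :: rest =>
    if k % 2 = 0 then
      if s = "L" then false else detect_q2_go (k + 1) rest
    else
      if s = "R" then false else detect_q2_go (k + 1) rest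

def detect_q2 (step_list : List String) : Bool := detect_q2_go 0 step_list

-- ===== PORT B =====
-- 'while it: check it[0], it[1]; it = it[2:]' as recursion consuming two elements per step
def detect_q2_alt_go : List String → Bool
  | [] => true
  | a :: rest =>
    if a = "L" then false
    else
      match rest with
      | [] => true
      | b :: rest2 => if b = "R" then false else detect_q2_alt_go rest2

def detect_q2_alt (step_list : List String) : Bool := detect_q2_alt_go step_list

-- ===== PRECONDITION & SPEC =====
def Spec_detect_q2 (step_list : List String) (out : Bool) : Prop := out = detect_q2_alt step_list
instance (step_list : List String) (out : Bool) : Decidable (Spec_detect_q2 step_list out) := by unfold Spec_detect_q2; infer_instance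

-- ===== CLAIM (what is proved, stated in full; the proofs are below) =====
def Claim_equal_detect_q2 : Prop := ∀ (step_list : List String), Dom_detect_q2 step_list → Spec_detect_q2 step_list (detect_q2 step_list)

-- ===== LEMMAS AND PROOFS =====
theorem detect_q2_go_mod (k : Nat) (l : List String) :
    detect_q2_go k l = detect_q2_go (k % 2) l := by
  induction l generalizing k with
  | nil => rfl
  | cons s rest ih =>
    have h2 : (k + 1) % 2 = (k % 2 + 1) % 2 := by omega
    have hm : k % 2 % 2 = k % 2 := Nat.mod_mod_of_dvd _ dvd_rfl
    simp only [detect_q2_go]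
    rw [hm, ih (k + 1), ih (k % 2 + 1), h2]

theorem detect_q2_go_eq_alt : ∀ l : List String, detect_q2_go 0 l = detect_q2_alt_go l
  | [] => rfl
  | [a] => by
      by_cases ha : a = "L" <;> simp [detect_q2_go, detect_q2_alt_go, ha]
  | a :: b :: rest => by
      have ih := detect_q2_go_eq_alt rest
      have hm := detect_q2_go_mod 2 rest
      by_cases ha : a = "L" <;> by_cases hb : b = "R" <;>
        simp_all [detect_q2_go, detect_q2_alt_go]

-- ===== VERDICT (by name: the statement is the Claim_ definition above) =====
theorem detect_q2_spec : Claim_equal_detect_q2 := by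
  intro l _
  unfold Spec_detect_q2 detect_q2 detect_q2_alt
  exact detect_q2_go_eq_alt l
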